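-- pv_equiv track=rewrite | github.com/Mwaron/Python | Py_2025/tesztverseny.py | hanypont
-- ===== SOURCE A (Python) =====
-- def hanypont(feladatok, megoldas):
--     pont = 0
--     for i, feladat in enumerate(feladatok):
--         if feladat == megoldas[i]:
--             if 0<=i<=4:
--                 pont += 3
--             elif 5<=i<=9:
--                 pont += 4
--             elif 10<=i<=12:
--                 pont += 5
--             else:
--                 pont += 6
--     return pont
-- ===== SOURCE B (Python) =====
-- def hanypont(feladatok, megoldas):
--     # Stage 1: collect the indices where the answer matches.
--     matches = [i for i in range(len(feladatok)) if feladatok[i] == megoldas[i]]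
--     # Stage 2: weight(i) = 3 + [i>=5] + [i>=10] + [i>=13], so the total is
--     # 3*|matches| plus three threshold counts.
--     return (3 * len(matches)
--             + sum(1 for i in matches if i >= 5)
--             + sum(1 for i in matches if i >= 10)
--             + sum(1 for i in matches if i >= 13))
-- ===== Notes on version B (the rewrite author's own statement) =====
-- stated objective: alternative
-- what changed: B replaces A's single scan with a per-index four-way weight branch by two stages: it first collects the list of matched indices, then computes the score arithmetically as 3*|matches| plus three threshold counts (#matches with i>=5, i>=10, i>=13), using the identity weight(i)=3+[i>=5]+[i>=10]+[i>=13]; no weight branching remains.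
import Mathlib
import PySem

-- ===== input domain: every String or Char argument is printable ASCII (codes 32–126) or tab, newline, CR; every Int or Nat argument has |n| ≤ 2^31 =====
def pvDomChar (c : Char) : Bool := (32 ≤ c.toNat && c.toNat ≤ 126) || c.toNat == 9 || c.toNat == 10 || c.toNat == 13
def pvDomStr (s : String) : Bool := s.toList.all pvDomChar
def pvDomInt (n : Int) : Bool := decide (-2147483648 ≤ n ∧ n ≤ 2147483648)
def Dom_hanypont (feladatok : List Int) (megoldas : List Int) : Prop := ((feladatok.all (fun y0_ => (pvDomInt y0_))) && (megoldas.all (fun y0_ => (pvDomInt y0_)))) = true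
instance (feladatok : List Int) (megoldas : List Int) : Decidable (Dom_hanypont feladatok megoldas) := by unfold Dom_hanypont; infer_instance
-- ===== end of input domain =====

-- B computes in two stages (collect matched indices, then 3*count plus three threshold
-- counts via weight(i)=3+[i>=5]+[i>=10]+[i>=13]); objective: alternative decomposition.

-- ===== PORT A =====
-- megoldas[i] is ported as pyGetD (total form); under Pre_hanypont (megoldas at least as
-- long as feladatok) every access is in range, exactly where Python A returns.
def hanypont (feladatok : List Int) (megoldas : List Int) : Int :=
  (PySem.List.enumerate feladatok).foldl
    (fun pont p =>
      if p.2 = PySem.List.pyGetD megoldas p.1 0 then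
        if 0 ≤ p.1 ∧ p.1 ≤ 4 then pont + 3
        else if 5 ≤ p.1 ∧ p.1 ≤ 9 then pont + 4
        else if 10 ≤ p.1 ∧ p.1 ≤ 12 then pont + 5
        else pont + 6
      else pont) 0

-- ===== PORT B =====
def hanypont_alt (feladatok : List Int) (megoldas : List Int) : Int :=
  let hits : List Int :=
    (PySem.List.pyRange 0 (feladatok.length : Int)).filter
      (fun i => PySem.List.pyGetD feladatok i 0 = PySem.List.pyGetD megoldas i 0)
  3 * (hits.length : Int)
    + (hits.countP (fun i => 5 ≤ i) : Int)
    + (hits.countP (fun i => 10 ≤ i) : Int)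
    + (hits.countP (fun i => 13 ≤ i) : Int)

-- ===== PRECONDITION & SPEC =====
-- Pre_: Python A raises IndexError (at megoldas[i]) exactly when megoldas is shorter than
-- feladatok; B raises there too, at the same index.
def Pre_hanypont (feladatok : List Int) (megoldas : List Int) : Prop :=
  feladatok.length ≤ megoldas.length
instance (feladatok : List Int) (megoldas : List Int) : Decidable (Pre_hanypont feladatok megoldas) := by unfold Pre_hanypont; infer_instance

def pvWitness_hanypont : List Int × List Int := ([1, 2, 3], [1, 0, 3])

def Spec_hanypont (feladatok : List Int) (megoldas : List Int) (out : Int) : Prop := out = hanypont_alt feladatok megoldas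
instance (feladatok : List Int) (megoldas : List Int) (out : Int) : Decidable (Spec_hanypont feladatok megoldas out) := by unfold Spec_hanypont; infer_instance

-- ===== CLAIM (what is proved, stated in full; the proofs are below) =====
def Claim_equal_hanypont : Prop := ∀ (feladatok : List Int) (megoldas : List Int), Dom_hanypont feladatok megoldas → Pre_hanypont feladatok megoldas → Spec_hanypont feladatok megoldas (hanypont feladatok megoldas)

-- ===== LEMMAS AND PROOFS =====

-- the per-index weight A's nested if-chain computes
def pvW (i : Int) : Int :=
  if 0 ≤ i ∧ i ≤ 4 then 3 else if 5 ≤ i ∧ i ≤ 9 then 4 else if 10 ≤ i ∧ i ≤ 12 then 5 else 6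

lemma pv_getD_cons_pos (x : Int) (t : List Int) (i d : Int) (h : 1 ≤ i) :
    PySem.List.pyGetD (x :: t) i d = PySem.List.pyGetD t (i - 1) d := by
  rw [PySem.List.pyGetD_of_nonneg _ _ (by omega), PySem.List.pyGetD_of_nonneg _ _ (by omega)]
  have h1 : i.toNat = (i - 1).toNat + 1 := by omega
  rw [h1, List.getD_cons_succ]

-- A's enumerate-fold as a sum of the weight over the index range
lemma pv_A_fold (m : List Int) :
    ∀ (f : List Int) (s acc : Int),
    (PySem.List.enumerate f s).foldl
      (fun pont p =>
        if p.2 = PySem.List.pyGetD m p.1 0 then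
          if 0 ≤ p.1 ∧ p.1 ≤ 4 then pont + 3
          else if 5 ≤ p.1 ∧ p.1 ≤ 9 then pont + 4
          else if 10 ≤ p.1 ∧ p.1 ≤ 12 then pont + 5
          else pont + 6
        else pont) acc
    = acc + ((PySem.List.pyRange s (s + f.length)).map
        (fun i => if PySem.List.pyGetD f (i - s) 0 = PySem.List.pyGetD m i 0 then pvW i else 0)).sum := by
  intro f
  induction f with
  | nil =>
    intro s acc
    simp [PySem.List.enumerate]
  | cons x t ih =>
    intro s acc
    have hcons : PySem.List.enumerate (x :: t) s = (s, x) :: PySem.List.enumerate t (s + 1) := by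
      simp [PySem.List.enumerate]
    rw [hcons]
    simp only [List.foldl_cons]
    rw [ih (s + 1)]
    have hr : PySem.List.pyRange s (s + ((x :: t).length : Int))
        = s :: PySem.List.pyRange (s + 1) (s + ((x :: t).length : Int)) :=
      PySem.List.pyRange_one_cons (by simp only [List.length_cons]; push_cast; omega)
    rw [hr, List.map_cons, List.sum_cons]
    have harg : (s + ((x :: t).length : Int)) = (s + 1) + (t.length : Int) := by simp only [List.length_cons]; push_cast; omega
    have hmap : (PySem.List.pyRange (s + 1) (s + ((x :: t).length : Int))).map
          (fun i => if PySem.List.pyGetD (x :: t) (i - s) 0 = PySem.List.pyGetD m i 0 then pvW i else 0)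
        = (PySem.List.pyRange (s + 1) ((s + 1) + (t.length : Int))).map
          (fun i => if PySem.List.pyGetD t (i - (s + 1)) 0 = PySem.List.pyGetD m i 0 then pvW i else 0) := by
      rw [harg]
      refine List.map_congr_left ?_
      intro i hi
      have hib := (PySem.List.mem_pyRange_one).mp hi
      rw [pv_getD_cons_pos x t (i - s) 0 (by omega)]
      have : i - s - 1 = i - (s + 1) := by omega
      rw [this]
    rw [hmap]
    have hhead : PySem.List.pyGetD (x :: t) (s - s) 0 = x := by
      have : s - s = (0 : Int) := by omega
      rw [this, PySem.List.pyGetD_of_nonneg _ _ (by omega)]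
      rfl
    rw [hhead]
    by_cases hx : x = PySem.List.pyGetD m s 0
    · simp only [hx, pvW]
      split_ifs <;> ring
    · simp only [if_neg hx]
      ring

-- an if-then-g-else-0 sum over a list is the sum of g over the filtered list
lemma pv_sum_ite_filter (p : Int → Prop) [DecidablePred p] (g : Int → Int) :
    ∀ (l : List Int),
    (l.map (fun i => if p i then g i else 0)).sum = ((l.filter (fun i => p i)).map g).sum := by
  intro l
  induction l with
  | nil => simp
  | cons x t ih =>
    by_cases hx : p x
    · simp [List.filter_cons, hx, ih]
    · simp [List.filter_cons, hx, ih]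

-- on nonnegative indices, summing pvW is 3 per element plus one per threshold crossed
lemma pv_sum_pvW (l : List Int) (h : ∀ i ∈ l, 0 ≤ i) :
    (l.map pvW).sum
    = 3 * (l.length : Int) + (l.countP (fun i => 5 ≤ i) : Int)
      + (l.countP (fun i => 10 ≤ i) : Int) + (l.countP (fun i => 13 ≤ i) : Int) := by
  induction l with
  | nil => simp
  | cons x t ih =>
    have hx : 0 ≤ x := h x (by simp)
    have ht := ih (fun i hi => h i (by simp [hi]))
    simp only [List.map_cons, List.sum_cons, List.countP_cons, List.length_cons, ht]
    unfold pvW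
    by_cases h5 : (5 : Int) ≤ x
    · by_cases h10 : (10 : Int) ≤ x
      · by_cases h13 : (13 : Int) ≤ x
        · rw [if_neg (by omega), if_neg (by omega), if_neg (by omega)]
          simp only [decide_eq_true_eq, h5, h10, h13, if_pos]
          push_cast; ring
        · rw [if_neg (by omega), if_neg (by omega), if_pos (by omega)]
          simp only [decide_eq_true_eq, if_pos h5, if_pos h10, if_neg h13]
          push_cast; ring
      · rw [if_neg (by omega), if_pos (by omega)]
        simp only [decide_eq_true_eq, if_pos h5, if_neg h10, if_neg (by omega : ¬ (13:Int) ≤ x)]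
        push_cast; ring
    · rw [if_pos (by omega)]
      simp only [decide_eq_true_eq, if_neg h5, if_neg (by omega : ¬ (10:Int) ≤ x),
        if_neg (by omega : ¬ (13:Int) ≤ x)]
      push_cast; ring

-- ===== VERDICT (by name: the statement is the Claim_ definition above) =====
theorem hanypont_spec : Claim_equal_hanypont := by
  intro f m _hdom _hpre
  unfold Spec_hanypont hanypont hanypont_alt
  rw [pv_A_fold m f 0 0]
  have hsub : ∀ i : Int, i - 0 = i := fun i => by ring
  simp only [hsub, zero_add]
  rw [pv_sum_ite_filter (fun i => PySem.List.pyGetD f i 0 = PySem.List.pyGetD m i 0) pvW]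
  rw [pv_sum_pvW _ (by
    intro i hi
    have := (PySem.List.mem_pyRange_one).mp (List.mem_of_mem_filter hi)
    omega)]
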